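-- pv_equiv track=rewrite | github.com/jksingh07/marketplace-deal-intelligence | src/stage4/derived_fields.py | compute_risk_level_overall
-- ===== SOURCE A (Python) =====
-- from typing import Any, Dict, List
--
-- def compute_risk_level_overall(signals: Dict[str, List[Dict[str, Any]]]) -> str:
--     """
--     Compute overall risk level based on all signals.
--
--     Rules:
--     - HIGH: Any HIGH severity verified signal exists
--     - MEDIUM: Multiple medium signals OR any medium verified + missing evidence
--     - LOW: Only low cosmetic signals and no major red flags
--     - UNKNOWN: Insufficient information
--
--     Args:
--         signals: All signals dictionary
--
--     Returns:
--         Risk level enum value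
--     """
--     high_verified_count = 0
--     high_inferred_count = 0
--     medium_verified_count = 0
--     medium_inferred_count = 0
--     low_count = 0
--     total_count = 0
--
--     # High-impact categories (not cosmetic)
--     high_impact_categories = [
--         "legality",
--         "accident_history",
--         "mechanical_issues",
--         "mods_performance",
--     ]
--
--     for category, signal_list in signals.items():
--         for signal in signal_list:
--             total_count += 1
--             severity = signal.get("severity", "low")
--             verification = signal.get("verification_level", "inferred")
--
--             # Only count high-impact categories for risk
--             if category in high_impact_categories:
--                 if severity == "high":
--                     if verification == "verified":
--                         high_verified_count += 1
--                     else: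
--                         high_inferred_count += 1
--                 elif severity == "medium":
--                     if verification == "verified":
--                         medium_verified_count += 1
--                     else:
--                         medium_inferred_count += 1
--                 else:
--                     low_count += 1
--
--     # Decision logic
--     if high_verified_count > 0:
--         return "high"
--
--     if high_inferred_count >= 2 or (high_inferred_count >= 1 and medium_verified_count >= 1):
--         return "high"
--
--     if medium_verified_count >= 2 or (medium_verified_count >= 1 and medium_inferred_count >= 2):
--         return "medium"
--
--     if high_inferred_count >= 1 or medium_verified_count >= 1:
--         return "medium"
--
--     if total_count == 0:
--         return "unknown"
--
--     return "low"
-- ===== SOURCE B (Python) =====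
-- from typing import Any, Dict, List
--
-- _HIGH_IMPACT = ("legality", "accident_history", "mechanical_issues", "mods_performance")
--
--
-- def _sev(sig):
--     return sig.get("severity", "low")
--
--
-- def _ver(sig):
--     return sig.get("verification_level", "inferred")
--
--
-- def compute_risk_level_overall(signals: Dict[str, List[Dict[str, Any]]]) -> str:
--     # Flatten only the high-impact categories once, then take independent counts.
--     impact = [s for cat, lst in signals.items() if cat in _HIGH_IMPACT for s in lst]
--
--     high_verified_count = sum(1 for s in impact if _sev(s) == "high" and _ver(s) == "verified")
--     high_inferred_count = sum(1 for s in impact if _sev(s) == "high" and _ver(s) != "verified")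
--     medium_verified_count = sum(1 for s in impact if _sev(s) == "medium" and _ver(s) == "verified")
--     medium_inferred_count = sum(1 for s in impact if _sev(s) == "medium" and _ver(s) != "verified")
--     total_count = sum(len(lst) for lst in signals.values())
--
--     if high_verified_count > 0:
--         return "high"
--     if high_inferred_count >= 2 or (high_inferred_count >= 1 and medium_verified_count >= 1):
--         return "high"
--     if medium_verified_count >= 2 or (medium_verified_count >= 1 and medium_inferred_count >= 2):
--         return "medium"
--     if high_inferred_count >= 1 or medium_verified_count >= 1:
--         return "medium"
--     if total_count == 0:
--         return "unknown"
--     return "low"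
-- ===== Notes on version B (the rewrite author's own statement) =====
-- stated objective: simpler
-- what changed: Replaces the single six-counter accumulating loop by independent declarative counts: the high-impact signals are flattened once and each of the four used counts is its own comprehension count (the dead low_count of A disappears), while total_count is a sum of list lengths over all categories; the decision cascade is unchanged.
import Mathlib
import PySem

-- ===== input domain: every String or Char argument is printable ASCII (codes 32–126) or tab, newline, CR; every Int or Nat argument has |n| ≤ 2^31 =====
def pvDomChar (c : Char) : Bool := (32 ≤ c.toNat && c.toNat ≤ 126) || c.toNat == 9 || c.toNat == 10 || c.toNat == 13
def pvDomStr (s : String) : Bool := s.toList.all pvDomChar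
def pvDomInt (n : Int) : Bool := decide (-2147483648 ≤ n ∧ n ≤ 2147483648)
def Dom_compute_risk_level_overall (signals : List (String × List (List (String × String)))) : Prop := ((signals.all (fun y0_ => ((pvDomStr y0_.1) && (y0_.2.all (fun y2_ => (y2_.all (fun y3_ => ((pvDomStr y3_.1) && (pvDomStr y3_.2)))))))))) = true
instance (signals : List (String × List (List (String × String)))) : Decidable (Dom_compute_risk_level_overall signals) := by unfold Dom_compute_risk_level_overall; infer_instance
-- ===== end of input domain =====

-- B replaces A's single six-counter accumulating loop by independent declarative
-- counts over the once-flattened high-impact signals (objective: simpler).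

-- shared helpers: the high-impact category list and the two dict lookups with defaults
def pvHIC : List String := ["legality", "accident_history", "mechanical_issues", "mods_performance"]
def pvSev (s : List (String × String)) : String := PySem.Dict.getD (PySem.Dict.mk s) "severity" "low"
def pvVer (s : List (String × String)) : String := PySem.Dict.getD (PySem.Dict.mk s) "verification_level" "inferred"

-- ===== PORT A =====
-- one step of A's inner loop body over the 6-counter state (hv, hi, mv, mi, lo, tot)
def pvStepA (cat : String) (st : Int × Int × Int × Int × Int × Int)
    (sg : List (String × String)) : Int × Int × Int × Int × Int × Int :=
  let (hv, hi, mv, mi, lo, tot) := st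
  let tot := tot + 1
  let severity := pvSev sg
  let verification := pvVer sg
  if pvHIC.contains cat then
    if severity == "high" then
      if verification == "verified" then (hv + 1, hi, mv, mi, lo, tot)
      else (hv, hi + 1, mv, mi, lo, tot)
    else if severity == "medium" then
      if verification == "verified" then (hv, hi, mv + 1, mi, lo, tot)
      else (hv, hi, mv, mi + 1, lo, tot)
    else (hv, hi, mv, mi, lo + 1, tot)
  else (hv, hi, mv, mi, lo, tot)

def compute_risk_level_overall (signals : List (String × List (List (String × String)))) : String :=
  let st := signals.foldl (fun st p => p.2.foldl (pvStepA p.1) st) (0, 0, 0, 0, 0, 0)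
  let (hv, hi, mv, mi, _lo, tot) := st
  if hv > 0 then "high"
  else if hi ≥ 2 ∨ (hi ≥ 1 ∧ mv ≥ 1) then "high"
  else if mv ≥ 2 ∨ (mv ≥ 1 ∧ mi ≥ 2) then "medium"
  else if hi ≥ 1 ∨ mv ≥ 1 then "medium"
  else if tot == 0 then "unknown"
  else "low"

-- ===== PORT B =====
def compute_risk_level_overall_alt (signals : List (String × List (List (String × String)))) : String :=
  let impact := (signals.filter (fun p => pvHIC.contains p.1)).flatMap (·.2)
  let hv : Int := (impact.countP (fun s => pvSev s == "high" && pvVer s == "verified") : Nat)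
  let hi : Int := (impact.countP (fun s => pvSev s == "high" && !(pvVer s == "verified")) : Nat)
  let mv : Int := (impact.countP (fun s => pvSev s == "medium" && pvVer s == "verified") : Nat)
  let mi : Int := (impact.countP (fun s => pvSev s == "medium" && !(pvVer s == "verified")) : Nat)
  let tot : Int := (signals.map (fun p => (p.2.length : Int))).sum
  if hv > 0 then "high"
  else if hi ≥ 2 ∨ (hi ≥ 1 ∧ mv ≥ 1) then "high"
  else if mv ≥ 2 ∨ (mv ≥ 1 ∧ mi ≥ 2) then "medium"
  else if hi ≥ 1 ∨ mv ≥ 1 then "medium"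
  else if tot == 0 then "unknown"
  else "low"

-- ===== PRECONDITION & SPEC =====
def Spec_compute_risk_level_overall (signals : List (String × List (List (String × String)))) (out : String) : Prop := out = compute_risk_level_overall_alt signals
instance (signals : List (String × List (List (String × String)))) (out : String) : Decidable (Spec_compute_risk_level_overall signals out) := by unfold Spec_compute_risk_level_overall; infer_instance

-- ===== CLAIM (what is proved, stated in full; the proofs are below) =====
def Claim_equal_compute_risk_level_overall : Prop := ∀ (signals : List (String × List (List (String × String)))), Dom_compute_risk_level_overall signals → Spec_compute_risk_level_overall signals (compute_risk_level_overall signals)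

-- ===== LEMMAS AND PROOFS =====

-- the per-category contribution of A's counters, expressed as B's counts
def pvCnt (cat : String) (p : List (String × String) → Bool)
    (l : List (List (String × String))) : Int :=
  if pvHIC.contains cat then ((l.countP p : Nat) : Int) else 0

def pvPHV (s : List (String × String)) : Bool := pvSev s == "high" && pvVer s == "verified"
def pvPHI (s : List (String × String)) : Bool := pvSev s == "high" && !(pvVer s == "verified")
def pvPMV (s : List (String × String)) : Bool := pvSev s == "medium" && pvVer s == "verified"
def pvPMI (s : List (String × String)) : Bool := pvSev s == "medium" && !(pvVer s == "verified")
def pvPLO (s : List (String × String)) : Bool := !(pvSev s == "high") && !(pvSev s == "medium")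

lemma pvStepA_eq (cat : String) (st : Int × Int × Int × Int × Int × Int)
    (sg : List (String × String)) :
    pvStepA cat st sg =
      (st.1 + pvCnt cat pvPHV [sg], st.2.1 + pvCnt cat pvPHI [sg],
       st.2.2.1 + pvCnt cat pvPMV [sg], st.2.2.2.1 + pvCnt cat pvPMI [sg],
       st.2.2.2.2.1 + pvCnt cat pvPLO [sg], st.2.2.2.2.2 + 1) := by
  obtain ⟨hv, hi, mv, mi, lo, tot⟩ := st
  simp only [pvStepA, pvCnt, pvPHV, pvPHI, pvPMV, pvPMI, pvPLO, List.countP_cons,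
    List.countP_nil]
  by_cases hc : pvHIC.contains cat = true <;>
  by_cases h1 : pvSev sg == "high" <;>
  by_cases h2 : pvSev sg == "medium" <;>
  by_cases h3 : pvVer sg == "verified" <;>
    simp_all

lemma pvInner_fold (cat : String) (l : List (List (String × String)))
    (st : Int × Int × Int × Int × Int × Int) :
    l.foldl (pvStepA cat) st =
      (st.1 + pvCnt cat pvPHV l, st.2.1 + pvCnt cat pvPHI l,
       st.2.2.1 + pvCnt cat pvPMV l, st.2.2.2.1 + pvCnt cat pvPMI l,
       st.2.2.2.2.1 + pvCnt cat pvPLO l, st.2.2.2.2.2 + l.length) := by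
  induction l generalizing st with
  | nil => simp [pvCnt]
  | cons s ls ih =>
      rw [List.foldl_cons, pvStepA_eq, ih]
      simp only [pvCnt, List.countP_cons, List.countP_nil, List.length_cons]
      by_cases hc : pvHIC.contains cat = true <;> simp_all [Prod.ext_iff] <;> omega

-- B's four counts and total, as functions of the input
def pvCount (p : List (String × String) → Bool)
    (signals : List (String × List (List (String × String)))) : Int :=
  (((signals.filter (fun q => pvHIC.contains q.1)).flatMap (·.2)).countP p : Nat)

def pvTot (signals : List (String × List (List (String × String)))) : Int :=
  (signals.map (fun p => (p.2.length : Int))).sum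

lemma pvOuter_fold (signals : List (String × List (List (String × String))))
    (st : Int × Int × Int × Int × Int × Int) :
    signals.foldl (fun st p => p.2.foldl (pvStepA p.1) st) st =
      (st.1 + pvCount pvPHV signals, st.2.1 + pvCount pvPHI signals,
       st.2.2.1 + pvCount pvPMV signals, st.2.2.2.1 + pvCount pvPMI signals,
       st.2.2.2.2.1 + pvCount pvPLO signals, st.2.2.2.2.2 + pvTot signals) := by
  induction signals generalizing st with
  | nil => simp [pvCount, pvTot]
  | cons q rest ih =>
      rw [List.foldl_cons, pvInner_fold, ih]
      simp only [pvCount, pvTot, pvCnt, List.filter_cons, List.map_cons, List.sum_cons]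
      by_cases hc : pvHIC.contains q.1 = true <;>
        simp_all [List.flatMap_cons, List.countP_append, Prod.ext_iff] <;> omega

-- ===== VERDICT (by name: the statement is the Claim_ definition above) =====
theorem compute_risk_level_overall_spec : Claim_equal_compute_risk_level_overall := by
  intro signals _
  show compute_risk_level_overall signals = compute_risk_level_overall_alt signals
  unfold compute_risk_level_overall compute_risk_level_overall_alt
  rw [pvOuter_fold]
  simp only [pvCount, pvTot, zero_add,
    show pvPHV = (fun s => pvSev s == "high" && pvVer s == "verified") from rfl,
    show pvPHI = (fun s => pvSev s == "high" && !(pvVer s == "verified")) from rfl,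
    show pvPMV = (fun s => pvSev s == "medium" && pvVer s == "verified") from rfl,
    show pvPMI = (fun s => pvSev s == "medium" && !(pvVer s == "verified")) from rfl]
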